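-- pv_equiv track=rewrite | github.com/PoisonIsTheCure/scrabble-game-only-functions- | PlacementDeMot.py | verifie_main
-- ===== SOURCE A (Python) =====
-- def verifie_main(main,liste_lettres):
--     lmain = list(main)
--     for elt in liste_lettres:
--         if elt in lmain:
--             lmain.remove(elt)
--         elif "?" in lmain:
--             lmain.remove("?")
--         else:
--             return False
--     return True
-- ===== SOURCE B (Python) =====
-- def verifie_main(main, liste_lettres):
--     have = {}
--     for c in main:
--         have[c] = have.get(c, 0) + 1
--     seen = {}
--     needed = 0
--     for l in liste_lettres:
--         seen[l] = seen.get(l, 0) + 1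
--         if l == "?" or seen[l] > have.get(l, 0):
--             needed += 1
--     return needed <= have.get("?", 0)
-- ===== Notes on version B (the rewrite author's own statement) =====
-- stated objective: alternative
-- what changed: Replaces the greedy remove-from-the-hand loop (membership test, list.remove mutation, early return) by pure frequency counting: one pass builds hand counts, one pass tallies total wildcard demand (explicit '?' tiles plus occurrences exceeding the hand's count of that letter), and a single final comparison against the hand's wildcard count decides.
import Mathlib
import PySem

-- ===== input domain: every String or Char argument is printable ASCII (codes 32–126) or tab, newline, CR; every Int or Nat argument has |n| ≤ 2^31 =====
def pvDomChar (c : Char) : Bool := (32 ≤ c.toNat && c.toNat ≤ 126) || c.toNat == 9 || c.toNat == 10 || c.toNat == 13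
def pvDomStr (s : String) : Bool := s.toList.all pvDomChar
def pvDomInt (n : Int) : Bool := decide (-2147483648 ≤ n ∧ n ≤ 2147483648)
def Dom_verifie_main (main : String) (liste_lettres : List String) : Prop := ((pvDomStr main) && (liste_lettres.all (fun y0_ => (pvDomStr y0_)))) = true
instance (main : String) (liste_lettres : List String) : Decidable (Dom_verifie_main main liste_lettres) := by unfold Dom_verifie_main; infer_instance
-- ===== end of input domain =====

-- B replaces A's greedy remove-from-the-hand loop by two counting passes and one final
-- comparison of total wildcard demand against the hand's wildcards (objective: alternative);
-- A mutates only its local copy of the hand, so return-value equivalence is the whole story.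

-- ===== PORT A =====
-- the for-loop over liste_lettres, with lmain the evolving local copy of the hand
def verifie_main_go : List String → List String → Bool
  | _, [] => true
  | lmain, elt :: rest =>
    if elt ∈ lmain then
      verifie_main_go ((PySem.List.remove? lmain elt).getD lmain) rest
    else if "?" ∈ lmain then
      verifie_main_go ((PySem.List.remove? lmain "?").getD lmain) rest
    else false

def verifie_main (main : String) (liste_lettres : List String) : Bool :=
  verifie_main_go (main.toList.map (fun c => c.toString)) liste_lettres

-- ===== PORT B =====
def verifie_main_alt (main : String) (liste_lettres : List String) : Bool :=
  let haveD : PySem.Dict String Int :=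
    (main.toList.map (fun c => c.toString)).foldl
      (fun d c => d.insert c (d.getD c 0 + 1)) PySem.Dict.empty
  let st := liste_lettres.foldl
    (fun (st : PySem.Dict String Int × Int) l =>
      let seen := st.1.insert l (st.1.getD l 0 + 1)
      (seen, if l == "?" || decide (haveD.getD l 0 < seen.getD l 0) then st.2 + 1 else st.2))
    (PySem.Dict.empty, 0)
  decide (st.2 ≤ haveD.getD "?" 0)

-- ===== PRECONDITION & SPEC =====
def Spec_verifie_main (main : String) (liste_lettres : List String) (out : Bool) : Prop := out = verifie_main_alt main liste_lettres
instance (main : String) (liste_lettres : List String) (out : Bool) : Decidable (Spec_verifie_main main liste_lettres out) := by unfold Spec_verifie_main; infer_instance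

-- ===== CLAIM (what is proved, stated in full; the proofs are below) =====
def Claim_equal_verifie_main : Prop := ∀ (main : String) (liste_lettres : List String), Dom_verifie_main main liste_lettres → Spec_verifie_main main liste_lettres (verifie_main main liste_lettres)

-- ===== LEMMAS AND PROOFS =====

-- wildcards forced by the non-'?' tiles of ls against hand, in A's greedy order
def pvShort : List String → List String → Nat
  | _, [] => 0
  | hand, e :: rest =>
    if e = "?" then pvShort hand rest
    else if e ∈ hand then pvShort (hand.erase e) rest
    else pvShort hand rest + 1

-- hand left after greedily erasing the elements of p
def pvResid (hand p : List String) : List String :=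
  p.foldl (fun h e => h.erase e) hand

-- B's loop body, named so the proof can address it (defeq to the lambda in the port)
def pvStepB (hand : List String) : (PySem.Dict String Int × Int) → String → (PySem.Dict String Int × Int) :=
  fun (st : PySem.Dict String Int × Int) l =>
    (st.1.insert l (st.1.getD l 0 + 1),
      if (l == "?" ||
          decide ((PySem.Dict.counter hand).getD l 0 <
            (st.1.insert l (st.1.getD l 0 + 1)).getD l 0)) = true then
        st.2 + 1
      else st.2)

lemma pvShort_erase_q : ∀ (ls hand : List String), pvShort (hand.erase "?") ls = pvShort hand ls := by
  intro ls
  induction ls with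
  | nil => intro hand; rfl
  | cons e rest ih =>
    intro hand
    by_cases hq : e = "?"
    · simp [pvShort, hq, ih]
    · have hmem : (e ∈ hand.erase "?") = (e ∈ hand) := by
        simp [List.mem_erase_of_ne hq]
      by_cases hm : e ∈ hand
      · simp [pvShort, hq, hm, hmem, List.erase_comm, ih]
      · simp [pvShort, hq, hm, hmem, ih]

lemma goA_eq : ∀ (ls hand : List String),
    verifie_main_go hand ls = decide (pvShort hand ls + ls.count "?" ≤ hand.count "?") := by
  intro ls
  induction ls with
  | nil => intro hand; simp [verifie_main_go, pvShort]
  | cons e rest ih =>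
    intro hand
    by_cases hm : e ∈ hand
    · rw [verifie_main_go, if_pos hm, PySem.List.remove?_eq_some_erase hand e hm]
      simp only [Option.getD_some]
      rw [ih]
      by_cases hq : e = "?"
      · subst hq
        have hpos : 0 < hand.count "?" := List.count_pos_iff.mpr hm
        rw [pvShort_erase_q]
        simp only [decide_eq_decide, pvShort, List.count_erase_self, List.count_cons,
          beq_iff_eq, if_true]
        omega
      · rw [List.count_erase_of_ne (fun h => hq h.symm)]
        simp only [decide_eq_decide, pvShort, if_pos hm,
          List.count_cons, beq_iff_eq, if_neg hq]
        omega
    · by_cases hw : "?" ∈ hand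
      · have hq' : e ≠ "?" := fun h => hm (h ▸ hw)
        rw [verifie_main_go, if_neg hm, if_pos hw, PySem.List.remove?_eq_some_erase hand "?" hw]
        simp only [Option.getD_some]
        rw [ih, pvShort_erase_q]
        have hpos : 0 < hand.count "?" := List.count_pos_iff.mpr hw
        simp only [decide_eq_decide, pvShort, if_neg hm, List.count_erase_self,
          List.count_cons, beq_iff_eq, if_neg hq']
        omega
      · rw [verifie_main_go, if_neg hm, if_neg hw]
        have h0 : hand.count "?" = 0 := List.count_eq_zero.mpr hw
        by_cases hq' : e = "?"
        · subst hq'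
          simp only [List.count_cons, beq_iff_eq, if_true, h0,
            eq_comm (a := false), decide_eq_false_iff_not]
          omega
        · simp only [pvShort, if_neg hm, List.count_cons, beq_iff_eq,
            if_neg hq', h0, eq_comm (a := false), decide_eq_false_iff_not]
          omega

lemma pvResid_count : ∀ (p hand : List String) (e : String),
    (pvResid hand p).count e = hand.count e - p.count e := by
  intro p
  induction p with
  | nil => intro hand e; simp [pvResid]
  | cons x p ih =>
    intro hand e
    have hx1 : pvResid hand (x :: p) = pvResid (hand.erase x) p := rfl
    rw [hx1, ih]
    by_cases hx : x = e
    · subst hx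
      rw [List.count_erase_self]
      simp
      omega
    · rw [List.count_erase_of_ne (fun h => hx h.symm)]
      simp [hx]

lemma pvResid_append (hand p : List String) (e : String) :
    pvResid hand (p ++ [e]) = (pvResid hand p).erase e := by
  simp [pvResid, List.foldl_append]

lemma pvCounter_snoc (p : List String) (e : String) :
    PySem.Dict.counter (p ++ [e])
      = (PySem.Dict.counter p).insert e ((PySem.Dict.counter p).getD e 0 + 1) := by
  rw [← PySem.Dict.foldl_insert_getD_add_one_eq_counter, List.foldl_append,
    PySem.Dict.foldl_insert_getD_add_one_eq_counter]
  rfl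

lemma pvBloop (hand : List String) : ∀ (ls p : List String) (a : Int),
    ls.foldl
      (fun (st : PySem.Dict String Int × Int) l =>
        let seen := st.1.insert l (st.1.getD l 0 + 1)
        (seen, if l == "?" || decide (((hand.count l : Int)) < seen.getD l 0) then st.2 + 1 else st.2))
      (PySem.Dict.counter p, a)
    = (PySem.Dict.counter (p ++ ls),
       a + (pvShort (pvResid hand p) ls : Int) + (ls.count "?" : Int)) := by
  intro ls
  induction ls with
  | nil => intro p a; simp [pvShort]
  | cons e rest ih =>
    intro p a
    have hseen : ((PySem.Dict.counter p).insert e ((PySem.Dict.counter p).getD e 0 + 1)).getD e 0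
        = (p.count e : Int) + 1 := by
      rw [PySem.Dict.getD_insert, if_pos rfl, PySem.Dict.getD_counter]
    simp only [List.foldl_cons]
    simp only [hseen]
    simp only [← pvCounter_snoc]
    by_cases hq : e = "?"
    · subst hq
      simp only [BEq.rfl, Bool.true_or, if_true, ih]
      rw [pvResid_append, pvShort_erase_q]
      simp only [List.append_assoc, List.singleton_append, List.count_cons_self,
        Prod.mk.injEq]
      refine ⟨trivial, ?_⟩
      rw [pvShort, if_pos rfl]
      push_cast; ring
    · have hbeq : (e == "?") = false := by simp [hq]
      by_cases hle : hand.count e ≤ p.count e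
      · have hcond : ((hand.count e : Int) < (p.count e : Int) + 1) := by exact_mod_cast by omega
        simp only [hbeq, Bool.false_or, decide_eq_true_eq, if_pos hcond, ih]
        have hnot : e ∉ pvResid hand p := by
          intro hmem
          have hcp := List.count_pos_iff.mpr hmem
          rw [pvResid_count] at hcp
          omega
        rw [pvResid_append, List.erase_of_not_mem hnot]
        simp only [List.append_assoc, List.singleton_append, Prod.mk.injEq]
        refine ⟨trivial, ?_⟩
        rw [pvShort, if_neg hq, if_neg hnot]
        simp only [List.count_cons, beq_iff_eq, if_neg hq]
        push_cast; ring
      · have hcond : ¬ ((hand.count e : Int) < (p.count e : Int) + 1) := by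
          exact_mod_cast by omega
        simp only [hbeq, Bool.false_or, decide_eq_true_eq, if_neg hcond, ih]
        have hmem : e ∈ pvResid hand p := by
          apply List.count_pos_iff.mp
          rw [pvResid_count]; omega
        rw [pvResid_append]
        simp only [List.append_assoc, List.singleton_append, Prod.mk.injEq]
        refine ⟨trivial, ?_⟩
        rw [pvShort, if_neg hq, if_pos hmem]
        simp only [List.count_cons, beq_iff_eq, if_neg hq]
        push_cast; ring

lemma pvBloopC (hand : List String) (ls : List String) :
    ls.foldl (pvStepB hand) (PySem.Dict.empty, 0)
    = (PySem.Dict.counter ls,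
       0 + (pvShort hand ls : Int) + (ls.count "?" : Int)) := by
  have hf : pvStepB hand
      = (fun (st : PySem.Dict String Int × Int) l =>
        let seen := st.1.insert l (st.1.getD l 0 + 1)
        (seen, if l == "?" || decide (((hand.count l : Int)) < seen.getD l 0) then st.2 + 1 else st.2)) := by
    funext st l
    simp only [pvStepB, PySem.Dict.getD_counter]
  rw [hf]
  have h0 := pvBloop hand ls [] 0
  simpa [pvResid] using h0

lemma altB_eq (main : String) (ls : List String) :
    verifie_main_alt main ls
      = decide ((pvShort (main.toList.map (fun c => c.toString)) ls : Int)
          + (ls.count "?" : Int) ≤ ((main.toList.map (fun c => c.toString)).count "?" : Int)) := by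
  unfold verifie_main_alt
  simp only [PySem.Dict.foldl_insert_getD_add_one_eq_counter]
  show decide ((List.foldl (pvStepB (main.toList.map (fun c => c.toString)))
      (PySem.Dict.empty, 0) ls).2
      ≤ (PySem.Dict.counter (main.toList.map (fun c => c.toString))).getD "?" 0) = _
  rw [pvBloopC, PySem.Dict.getD_counter]
  simp only [decide_eq_decide]
  omega

-- ===== VERDICT (by name: the statement is the Claim_ definition above) =====
theorem verifie_main_spec : Claim_equal_verifie_main := by
  intro main ls _
  unfold Spec_verifie_main
  rw [verifie_main, goA_eq, altB_eq]
  simp only [decide_eq_decide]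
  omega
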